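-- pv_equiv track=rewrite | github.com/marcoscfreitas/furg-1ano | algoritmos e estruturas de dados 1/beecrowd/risada.py | GetVogalRisadaInversa
-- ===== SOURCE A (Python) =====
-- def GetVogalRisadaInversa (risada) :
--     risadaVogalInversa = ''
--     cont2 = (len(risada)-1)
--     while cont2 >= 0 :
--         if risada[cont2] == 'a' or risada[cont2] == 'e' or risada[cont2] == 'i' or risada[cont2] == 'o' or risada[cont2] == 'u' :
--             risadaVogalInversa = risadaVogalInversa + risada[cont2]
--         cont2-=1
--     return risadaVogalInversa
-- ===== SOURCE B (Python) =====
-- def GetVogalRisadaInversa(risada):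
--     vogais = ''.join(c for c in risada if c in 'aeiou')
--     return vogais[::-1]
-- ===== Notes on version B (the rewrite author's own statement) =====
-- stated objective: faster
-- what changed: B filters the vowels with a forward comprehension/join and reverses with slicing, replacing A's backward index loop that grows the result by repeated string concatenation.
import Mathlib
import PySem

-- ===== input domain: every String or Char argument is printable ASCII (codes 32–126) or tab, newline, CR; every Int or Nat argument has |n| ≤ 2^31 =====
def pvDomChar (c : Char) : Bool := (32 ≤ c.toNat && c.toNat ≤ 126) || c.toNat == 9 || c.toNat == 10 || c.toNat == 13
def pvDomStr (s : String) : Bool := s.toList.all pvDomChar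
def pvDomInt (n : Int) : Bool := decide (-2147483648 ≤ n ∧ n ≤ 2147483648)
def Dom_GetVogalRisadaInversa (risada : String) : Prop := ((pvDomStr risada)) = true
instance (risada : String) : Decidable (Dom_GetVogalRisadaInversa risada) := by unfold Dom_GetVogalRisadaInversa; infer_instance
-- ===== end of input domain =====

-- B replaces A's backward index loop (quadratic string concatenation) by a forward
-- vowel filter followed by a reversal — idiomatic two-step decomposition.

-- ===== PORT A =====
-- A's vowel test: risada[cont2] == 'a' or … or risada[cont2] == 'u'
def pvIsVogal (c : Char) : Bool :=
  c == 'a' || c == 'e' || c == 'i' || c == 'o' || c == 'u'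

-- A's while loop: cont2 runs len-1, …, 0; fuel n means "next index to visit is n-1".
def pvLoopA (cs : List Char) : Nat → List Char → List Char
  | 0, acc => acc
  | n+1, acc =>
      let c := cs.getD n ' '
      pvLoopA cs n (if pvIsVogal c then acc ++ [c] else acc)

def GetVogalRisadaInversa (risada : String) : String :=
  String.ofList (pvLoopA risada.toList risada.toList.length [])

-- ===== PORT B =====
def GetVogalRisadaInversa_alt (risada : String) : String :=
  let vogais := risada.toList.filter pvIsVogal   -- ''.join(c for c in risada if c in 'aeiou')
  String.ofList vogais.reverse                       -- vogais[::-1]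

-- ===== PRECONDITION & SPEC =====
def Spec_GetVogalRisadaInversa (risada : String) (out : String) : Prop := out = GetVogalRisadaInversa_alt risada
instance (risada : String) (out : String) : Decidable (Spec_GetVogalRisadaInversa risada out) := by unfold Spec_GetVogalRisadaInversa; infer_instance

-- ===== CLAIM (what is proved, stated in full; the proofs are below) =====
def Claim_equal_GetVogalRisadaInversa : Prop := ∀ (risada : String), Dom_GetVogalRisadaInversa risada → Spec_GetVogalRisadaInversa risada (GetVogalRisadaInversa risada)

-- ===== LEMMAS AND PROOFS =====

-- Loop invariant: with fuel n ≤ |cs|, A's loop appends the reversed vowel filter of the first n chars.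
theorem pvLoopA_eq (cs : List Char) :
    ∀ n acc, n ≤ cs.length →
      pvLoopA cs n acc = acc ++ ((cs.take n).filter pvIsVogal).reverse := by
  intro n
  induction n with
  | zero => intro acc _; simp [pvLoopA]
  | succ n ih =>
      intro acc hn
      have hlt : n < cs.length := hn
      have hget : cs.getD n ' ' = cs[n] := by
        simp [List.getD_eq_getElem?_getD, List.getElem?_eq_getElem hlt]
      have htake : cs.take (n+1) = cs.take n ++ [cs[n]] := by
        rw [List.take_add_one, List.getElem?_eq_getElem hlt]; rfl
      rw [pvLoopA]
      simp only [hget]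
      rw [ih _ (Nat.le_of_lt hlt), htake, List.filter_append]
      by_cases hv : pvIsVogal cs[n] <;> simp [hv]

theorem GetVogalRisadaInversa_spec : Claim_equal_GetVogalRisadaInversa := by
  intro risada _
  unfold Spec_GetVogalRisadaInversa GetVogalRisadaInversa GetVogalRisadaInversa_alt
  rw [pvLoopA_eq _ _ _ (le_refl _), List.take_length, List.nil_append]
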